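-- pv_equiv track=rewrite | github.com/gawel/pyquery | pyquery/text.py | _squash_artifical_nl
-- ===== SOURCE A (Python) =====
-- def _squash_artifical_nl(parts):
--     output, last_nl = [], False
--     for x in parts:
--         if x is not None:
--             output.append(x)
--             last_nl = False
--         elif not last_nl:
--             output.append(None)
--             last_nl = True
--     return output
-- ===== SOURCE B (Python) =====
-- def _squash_artifical_nl(parts):
--     # staged: build a keep-mask from predecessors, then filter with zip
--     keep = [True] + [p is not None for p in parts[:-1]]
--     return [x for x, k in zip(parts, keep) if x is not None or k]
-- ===== Notes on version B (the rewrite author's own statement) =====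
-- stated objective: alternative
-- what changed: Replaces A's stateful single pass with a last_nl flag by a staged two-pass comprehension: first build a boolean keep-mask from each element's predecessor (parts[:-1]), then zip-filter, keeping an element iff it is non-None or its predecessor was non-None.
import Mathlib
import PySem

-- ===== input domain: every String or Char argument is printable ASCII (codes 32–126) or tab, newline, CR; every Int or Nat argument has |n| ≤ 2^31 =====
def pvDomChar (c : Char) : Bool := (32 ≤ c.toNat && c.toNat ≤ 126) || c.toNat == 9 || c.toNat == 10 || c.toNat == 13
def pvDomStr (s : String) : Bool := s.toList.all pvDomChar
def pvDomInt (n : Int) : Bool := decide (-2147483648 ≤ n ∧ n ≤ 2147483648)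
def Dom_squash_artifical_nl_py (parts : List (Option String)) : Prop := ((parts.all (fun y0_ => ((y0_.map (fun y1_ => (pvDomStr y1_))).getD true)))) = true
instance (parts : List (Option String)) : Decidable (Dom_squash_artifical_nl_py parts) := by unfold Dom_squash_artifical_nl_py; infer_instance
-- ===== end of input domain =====

-- B replaces A's stateful flag pass by a staged keep-mask-then-zip-filter (alternative decomposition; same cost).

-- ===== PORT A =====
-- fold over parts carrying the (output, last_nl) state, exactly A's loop body
def squash_artifical_nl_py (parts : List (Option String)) : List (Option String) :=
  (parts.foldl
    (fun (st : List (Option String) × Bool) x =>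
      match x with
      | some _ => (st.1 ++ [x], false)
      | none => if !st.2 then (st.1 ++ [none], true) else st)
    ([], false)).1

-- ===== PORT B =====
-- Source B: keep = [True] + [p is not None for p in parts[:-1]]; then the zip-filter comprehension
def squash_artifical_nl_py_alt (parts : List (Option String)) : List (Option String) :=
  let keep : List Bool := true :: (PySem.List.slice parts none (some (-1))).map (fun p => p.isSome)
  (parts.zip keep).filterMap (fun xk => if xk.1.isSome || xk.2 then some xk.1 else none)

-- ===== PRECONDITION & SPEC =====
def Spec_squash_artifical_nl_py (parts : List (Option String)) (out : List (Option String)) : Prop := out = squash_artifical_nl_py_alt parts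
instance (parts : List (Option String)) (out : List (Option String)) : Decidable (Spec_squash_artifical_nl_py parts out) := by unfold Spec_squash_artifical_nl_py; infer_instance

-- ===== CLAIM (what is proved, stated in full; the proofs are below) =====
def Claim_equal_squash_artifical_nl_py : Prop := ∀ (parts : List (Option String)), Dom_squash_artifical_nl_py parts → Spec_squash_artifical_nl_py parts (squash_artifical_nl_py parts)

-- ===== LEMMAS AND PROOFS =====

-- what A's loop appends to the output, as a function of the current last_nl flag
def aBody (flag : Bool) : List (Option String) → List (Option String)
  | [] => []
  | some s :: t => some s :: aBody false t
  | none :: t => if flag then aBody true t else none :: aBody true t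

theorem foldl_eq_aBody (l : List (Option String)) (out : List (Option String)) (flag : Bool) :
    (l.foldl
      (fun (st : List (Option String) × Bool) x =>
        match x with
        | some _ => (st.1 ++ [x], false)
        | none => if !st.2 then (st.1 ++ [none], true) else st)
      (out, flag)).1 = out ++ aBody flag l := by
  induction l generalizing out flag with
  | nil => simp [aBody]
  | cons x t ih =>
    cases x with
    | some s => simpa [aBody, List.foldl_cons, List.append_assoc] using ih (out ++ [some s]) false
    | none =>
      cases flag with
      | false =>
        have h := ih (out ++ [none]) true
        rw [List.append_assoc] at h
        simpa [aBody, List.foldl_cons] using h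
      | true => simpa [aBody, List.foldl_cons, List.append_assoc] using ih out true

-- B's zip-filter with keep list 'k :: map isSome l.dropLast', characterised recursively
theorem zipFilter_eq_aBody (l : List (Option String)) (k : Bool) :
    ((l.zip (k :: l.dropLast.map (fun p => p.isSome))).filterMap
      (fun xk => if xk.1.isSome || xk.2 then some xk.1 else none)) = aBody (!k) l := by
  induction l generalizing k with
  | nil => simp [aBody]
  | cons x t ih =>
    cases t with
    | nil => cases x <;> cases k <;> simp [aBody]
    | cons y u =>
      have hdl : (x :: y :: u).dropLast = x :: (y :: u).dropLast := rfl
      rw [hdl]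
      cases x with
      | some s =>
        simpa [aBody, List.zip_cons_cons] using ih (k := true)
      | none =>
        cases k with
        | true => simpa [aBody, List.zip_cons_cons] using ih (k := false)
        | false => simpa [aBody, List.zip_cons_cons] using ih (k := false)

-- ===== VERDICT (by name: the statement is the Claim_ definition above) =====
theorem squash_artifical_nl_py_spec : Claim_equal_squash_artifical_nl_py := by
  intro parts _
  unfold Spec_squash_artifical_nl_py squash_artifical_nl_py squash_artifical_nl_py_alt
  rw [foldl_eq_aBody, PySem.List.slice_to_neg_one, zipFilter_eq_aBody]
  simp
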